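-- pv_equiv track=rewrite | github.com/MrBrantCode/unitest_baseline | mut_generate/mist_train_taco/taco_9233/solution.py | count_divisibles
-- ===== SOURCE A (Python) =====
-- from collections import Counter
--
-- def count_divisibles(A, Q):
--     # Create a Counter object for the array A
--     s = Counter(A)
--     # Find the maximum value in the array A
--     m = max(A)
--     # Initialize the result list with zeros
--     ans = [0] * len(Q)
--
--     # Iterate over each query in Q
--     for i, e in enumerate(Q):
--         # If the query is not zero, count the multiples of e in A
--         if e != 0:
--             for k in range(e, m + 1, e):
--                 ans[i] += s.get(k, 0)
--
--     return ans
-- ===== SOURCE B (Python) =====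
-- def count_divisibles(A, Q):
--     # One direct scan of A per query (count a > 0 with a % e == 0) instead of
--     # A's Counter plus a walk over every multiple of e up to max(A).
--     # For e <= 0 the answer is 0 (A counts only positive multiples).
--     ans = []
--     for e in Q:
--         if e > 0:
--             c = 0
--             for a in A:
--                 if a > 0 and a % e == 0:
--                     c += 1
--             ans.append(c)
--         else:
--             ans.append(0)
--     return ans
-- ===== Notes on version B (the rewrite author's own statement) =====
-- stated objective: alternative
-- what changed: B answers each query by scanning the array once and counting elements a > 0 with a % e == 0, instead of A's Counter plus a walk over every multiple of e up to max(A); no Counter, no max, no value-space traversal.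
import Mathlib
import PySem

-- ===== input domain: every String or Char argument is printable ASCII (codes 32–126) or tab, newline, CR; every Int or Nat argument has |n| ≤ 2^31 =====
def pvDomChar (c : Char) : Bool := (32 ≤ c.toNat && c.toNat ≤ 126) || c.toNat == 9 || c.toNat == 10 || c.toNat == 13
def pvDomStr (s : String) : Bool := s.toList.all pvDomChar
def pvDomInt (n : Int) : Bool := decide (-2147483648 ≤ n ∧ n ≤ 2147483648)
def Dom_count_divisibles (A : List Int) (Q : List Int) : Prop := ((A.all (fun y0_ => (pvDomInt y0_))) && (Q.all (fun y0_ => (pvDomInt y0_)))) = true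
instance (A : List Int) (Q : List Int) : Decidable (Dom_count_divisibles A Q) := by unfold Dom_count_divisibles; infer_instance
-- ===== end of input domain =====

-- B answers each query by one direct scan of A (counting positive multiples),
-- replacing A's Counter plus per-multiple walk; proved equal on nonempty A
-- (A raises ValueError on max([])).

-- ===== PORT A =====
-- s = Counter(A); m = max(A); for each query e != 0, sum s.get(k, 0) over
-- k in range(e, m+1, e).  max([]) raises ValueError, so Pre_ requires A ≠ [];
-- outside Pre_ the port uses 0 for m (nothing is claimed there).
def count_divisibles (A : List Int) (Q : List Int) : List Int :=
  let s := PySem.Dict.counter A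
  let m := match PySem.List.max? A (fun x => x) with
           | some v => v
           | none => 0
  Q.map (fun e =>
    if e ≠ 0 then
      (PySem.List.pyRange e (m + 1) e).foldl (fun acc k => acc + s.getD k 0) 0
    else 0)

-- ===== PORT B =====
def count_divisibles_alt (A : List Int) (Q : List Int) : List Int :=
  Q.foldl (fun ans e =>
    ans ++ [if 0 < e then
              A.foldl (fun c a => if 0 < a ∧ PySem.Int.mod a e = 0 then c + 1 else c) 0
            else 0]) []

-- ===== PRECONDITION & SPEC =====
-- Pre_ excludes only the empty array A, on which Python A raises ValueError (max([])).
def Pre_count_divisibles (A : List Int) (Q : List Int) : Prop := A ≠ []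
instance (A : List Int) (Q : List Int) : Decidable (Pre_count_divisibles A Q) := by unfold Pre_count_divisibles; infer_instance
def pvWitness_count_divisibles : List Int × List Int := ([3, 4, 6, -2], [2, 3, 0, -2])

def Spec_count_divisibles (A : List Int) (Q : List Int) (out : List Int) : Prop := out = count_divisibles_alt A Q
instance (A : List Int) (Q : List Int) (out : List Int) : Decidable (Spec_count_divisibles A Q out) := by unfold Spec_count_divisibles; infer_instance

-- ===== CLAIM (what is proved, stated in full; the proofs are below) =====
def Claim_equal_count_divisibles : Prop := ∀ (A : List Int) (Q : List Int), Dom_count_divisibles A Q → Pre_count_divisibles A Q → Spec_count_divisibles A Q (count_divisibles A Q)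

-- ===== LEMMAS AND PROOFS =====

-- the predicate both sides count: a positive element divisible by e
def pvPred (e : Int) : Int → Bool := fun a => decide (0 < a ∧ PySem.Int.mod a e = 0)

-- folding '+ count' over a list is the sum of the counts
theorem pv_foldl_add_counts (A L : List Int) (i : Int) :
    L.foldl (fun acc k => acc + (A.count k : Int)) i
      = i + (L.map (fun k => (A.count k : Int))).sum := by
  induction L generalizing i with
  | nil => simp
  | cons k L ih => simp [List.foldl_cons, ih]; ring

-- the sum of the indicator of one value a over a duplicate-free list L
theorem pv_sum_indicator (a : Int) (L : List Int) (hL : L.Nodup) :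
    (L.map (fun k => if k = a then (1 : Int) else 0)).sum = if a ∈ L then 1 else 0 := by
  induction L with
  | nil => simp
  | cons b L ih =>
    rw [List.nodup_cons] at hL
    by_cases hba : b = a
    · subst hba
      simp [ih hL.2, hL.1]
    · simp only [List.map_cons, List.sum_cons, if_neg hba, ih hL.2, List.mem_cons]
      have : ¬ a = b := fun h => hba h.symm
      simp [this]

-- over a duplicate-free list L, the sum of per-element counts in A is the
-- number of elements of A that lie in L
theorem pv_sum_counts_eq_countP (A L : List Int) (hL : L.Nodup) :
    (L.map (fun k => (A.count k : Int))).sum = (A.countP (fun a => decide (a ∈ L)) : Int) := by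
  induction A with
  | nil => simp
  | cons a A ih =>
    have hcnt : ∀ k : Int, (List.count k (a :: A) : Int)
        = (List.count k A : Int) + (if k = a then 1 else 0) := by
      intro k
      by_cases h : k = a
      · simp [h]
      · have h' : ¬ a = k := fun hh => h hh.symm
        simp [h, h']
    have h1 : (L.map (fun k => (List.count k (a :: A) : Int))).sum
        = (L.map (fun k => (List.count k A : Int))).sum
          + (L.map (fun k => if k = a then (1 : Int) else 0)).sum := by
      rw [← List.sum_map_add]
      exact congrArg _ (List.map_congr_left (fun k _ => hcnt k))
    rw [h1, ih, pv_sum_indicator a L hL, List.countP_cons]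
    by_cases hmem : a ∈ L <;> simp [hmem]

-- fmod by a positive modulus vanishes exactly on multiples
theorem pv_fmod_eq_zero_iff (a e : Int) (he : 0 < e) :
    PySem.Int.mod a e = 0 ↔ e ∣ a := by
  unfold PySem.Int.mod
  rw [Int.fmod_eq_emod]
  simp [Or.inl he.le]

-- the pyRange with positive step e is duplicate-free
theorem pv_nodup_pyRange_step (e b : Int) (he : 0 < e) :
    (PySem.List.pyRange e b e).Nodup := by
  rw [PySem.List.pyRange_of_pos _ _ he]
  refine List.Nodup.map ?_ List.nodup_range
  intro x y hxy
  simp only at hxy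
  have : (x : Int) = (y : Int) := by nlinarith [hxy]
  exact_mod_cast this

-- membership in pyRange e (m+1) e, for an element a with a ≤ m, is pvPred
theorem pv_mem_range_iff (a m e : Int) (hpos : 0 < e) (ham : a ≤ m) :
    a ∈ PySem.List.pyRange e (m + 1) e ↔ (0 < a ∧ PySem.Int.mod a e = 0) := by
  rw [PySem.List.mem_pyRange_iff_of_pos hpos]
  have hdvd : e ∣ a - e ↔ e ∣ a := by
    constructor
    · intro h; have := dvd_add h (dvd_refl e); simpa using this
    · intro h; exact dvd_sub h (dvd_refl e)
  constructor
  · rintro ⟨h1, _, h3⟩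
    exact ⟨lt_of_lt_of_le hpos h1, (pv_fmod_eq_zero_iff a e hpos).mpr (hdvd.mp h3)⟩
  · rintro ⟨h1, h2⟩
    have hd : e ∣ a := (pv_fmod_eq_zero_iff a e hpos).mp h2
    refine ⟨?_, by omega, hdvd.mpr hd⟩
    rcases hd with ⟨c, rfl⟩
    have hc : 1 ≤ c := by nlinarith
    nlinarith

-- A's entry for one query e is the count of positive multiples of e in A
theorem pv_query_A (A : List Int) (m e : Int) (hmax : ∀ a ∈ A, a ≤ m) :
    (if e ≠ 0 then
      (PySem.List.pyRange e (m + 1) e).foldl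
        (fun acc k => acc + (PySem.Dict.counter A).getD k 0) 0
     else 0)
    = (if 0 < e then (A.countP (pvPred e) : Int) else 0) := by
  have hfold : ∀ L : List Int,
      L.foldl (fun acc k => acc + (PySem.Dict.counter A).getD k 0) 0
        = (L.map (fun k => (A.count k : Int))).sum := by
    intro L
    have heq : (fun (acc : Int) (k : Int) => acc + (PySem.Dict.counter A).getD k 0)
        = fun acc k => acc + (A.count k : Int) := by
      funext acc k
      rw [PySem.Dict.getD_counter]
    rw [heq, pv_foldl_add_counts]
    simp
  rcases lt_trichotomy e 0 with hneg | hzero | hpos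
  · -- e < 0 : every element of the range exceeds m, so every count is 0
    rw [if_pos (ne_of_lt hneg), if_neg (not_lt.mpr hneg.le), hfold]
    apply List.sum_eq_zero
    intro x hx
    obtain ⟨k, hk, rfl⟩ := List.mem_map.mp hx
    rw [PySem.List.mem_pyRange_iff_of_neg hneg] at hk
    have : k ∉ A := fun hka => absurd (hmax k hka) (not_le.mpr (by linarith [hk.1]))
    simp [List.count_eq_zero_of_not_mem this]
  · subst hzero; simp
  · rw [if_pos (ne_of_gt hpos), if_pos hpos, hfold,
      pv_sum_counts_eq_countP A _ (pv_nodup_pyRange_step e (m + 1) hpos)]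
    congr 1
    apply List.countP_congr
    intro a ha
    simp only [decide_eq_true_eq, pvPred]
    rw [pv_mem_range_iff a m e hpos (hmax a ha)]

-- B's entry for one query e is the same count of positive multiples
theorem pv_query_B (A : List Int) (e : Int) :
    (if 0 < e then
      A.foldl (fun c a => if 0 < a ∧ PySem.Int.mod a e = 0 then c + 1 else c) 0
     else 0)
    = (if 0 < e then (A.countP (pvPred e) : Int) else 0) := by
  by_cases h : 0 < e
  · rw [if_pos h, if_pos h, PySem.List.foldl_ite_add_one, zero_add]
    rfl
  · rw [if_neg h, if_neg h]

-- ===== VERDICT (by name: the statement is the Claim_ definition above) =====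
theorem count_divisibles_spec : Claim_equal_count_divisibles := by
  intro A Q _ hpre
  unfold Spec_count_divisibles count_divisibles count_divisibles_alt
  rw [PySem.List.foldl_append_singleton_eq_map]
  simp only [List.nil_append]
  obtain ⟨v, hv⟩ : ∃ v, PySem.List.max? A (fun x => x) = some v := by
    cases h : PySem.List.max? A (fun x => x) with
    | none => exact absurd ((PySem.List.max?_eq_none_iff (xs := A) (key := fun x => x)).mp h) hpre
    | some v => exact ⟨v, rfl⟩
  simp only [hv]
  apply List.map_congr_left
  intro e _
  rw [pv_query_A A v e (fun a ha => PySem.List.max?_isMax hv a ha), ← pv_query_B A e]
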